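-- pv_equiv track=rewrite | github.com/arinakosovskaia/legal_contracts | app/annotated_pdf.py | _find_quote_ranges_with_ids
-- ===== SOURCE A (Python) =====
-- from typing import Iterable
--
-- def _find_quote_ranges_with_ids(
--     text: str, quotes_with_ids: Iterable[tuple[str, int]]
-- ) -> list[tuple[int, int, int]]:
--     ranges: list[tuple[int, int, int]] = []
--     for q, qid in quotes_with_ids:
--         q = (q or "").strip()
--         if not q:
--             continue
--         start = 0
--         while True:
--             idx = text.find(q, start)
--             if idx == -1:
--                 break
--             ranges.append((idx, idx + len(q), qid))
--             start = idx + max(1, len(q))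
--     return ranges
-- ===== SOURCE B (Python) =====
-- def _find_quote_ranges_with_ids(text, quotes_with_ids):
--     # Scan the text once per DISTINCT stripped quote, caching its list of
--     # non-overlapping occurrence positions, then emit the results in input order.
--     items = [((q or "").strip(), qid) for q, qid in quotes_with_ids]
--     occurrences = {}
--     for q, _ in items:
--         if q and q not in occurrences:
--             positions = []
--             idx = text.find(q)
--             while idx != -1:
--                 positions.append(idx)
--                 idx = text.find(q, idx + len(q))
--             occurrences[q] = positions
--     return [
--         (i, i + len(q), qid)
--         for q, qid in items
--         if q
--         for i in occurrences[q]
--     ]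
-- ===== Notes on version B (the rewrite author's own statement) =====
-- stated objective: faster
-- what changed: Instead of re-running the find-loop for every list entry, B strips all quotes up front, scans the text once per DISTINCT stripped quote into a hash-cached occurrence list, and emits the output as a single comprehension over the stripped list, so duplicate quotes cost one dict lookup instead of a full text scan.
import Mathlib
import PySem

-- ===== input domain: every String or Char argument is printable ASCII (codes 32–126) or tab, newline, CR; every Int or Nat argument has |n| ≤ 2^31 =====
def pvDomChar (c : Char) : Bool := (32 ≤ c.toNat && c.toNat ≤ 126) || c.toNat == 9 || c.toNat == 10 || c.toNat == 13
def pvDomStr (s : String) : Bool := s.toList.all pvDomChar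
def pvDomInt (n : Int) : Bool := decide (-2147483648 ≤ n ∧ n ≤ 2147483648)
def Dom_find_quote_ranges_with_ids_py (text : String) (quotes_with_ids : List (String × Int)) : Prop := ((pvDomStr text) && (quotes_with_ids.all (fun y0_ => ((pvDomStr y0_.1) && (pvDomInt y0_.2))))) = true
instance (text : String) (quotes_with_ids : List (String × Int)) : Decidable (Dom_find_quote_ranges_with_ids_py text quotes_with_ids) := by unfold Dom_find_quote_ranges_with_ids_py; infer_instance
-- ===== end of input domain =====

-- B scans the text once per DISTINCT stripped quote (hash-cached occurrence
-- lists) and emits results in input order, instead of A's find-loop per entry.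

-- ===== PORT A =====
-- the inner 'while True: idx = text.find(q, start) …' loop; fuel makes the
-- recursion total (text length + 2 iterations always suffice: each step moves
-- start forward by at least 1)
def pvALoop (text q : String) (qid : Int) : Nat → Int → List (Int × Int × Int)
  | 0, _ => []
  | fuel+1, start =>
    let idx := PySem.Str.findFrom text q start
    if idx = -1 then []
    else (idx, idx + PySem.Str.len q, qid) :: pvALoop text q qid fuel (idx + max 1 (PySem.Str.len q))

def find_quote_ranges_with_ids_py (text : String) (quotes_with_ids : List (String × Int)) : List (Int × Int × Int) :=
  quotes_with_ids.foldl (fun ranges p =>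
    let q := PySem.Str.strip p.1
    if q = "" then ranges
    else ranges ++ pvALoop text q p.2 (text.toList.length + 2) 0) []

-- ===== PORT B =====
-- 'idx = text.find(q); while idx != -1: positions.append(idx); idx = text.find(q, idx + len(q))'
def pvBLoop (text q : String) : Nat → Int → List Int
  | 0, _ => []
  | fuel+1, idx =>
    if idx = -1 then []
    else idx :: pvBLoop text q fuel (PySem.Str.findFrom text q (idx + PySem.Str.len q))

-- the cached occurrence list of one distinct stripped quote
def pvOccOf (text q : String) : List Int :=
  pvBLoop text q (text.toList.length + 2) (PySem.Str.find text q)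

def find_quote_ranges_with_ids_py_alt (text : String) (quotes_with_ids : List (String × Int)) : List (Int × Int × Int) :=
  let items := quotes_with_ids.map (fun p => (PySem.Str.strip p.1, p.2))
  let occurrences := items.foldl (fun (d : PySem.Dict String (List Int)) p =>
      if p.1 = "" then d
      else if d.contains p.1 then d
      else d.insert p.1 (pvOccOf text p.1)) PySem.Dict.empty
  items.flatMap (fun p =>
    if p.1 = "" then []
    else (occurrences.getD p.1 []).map (fun i => (i, i + PySem.Str.len p.1, p.2)))

-- ===== PRECONDITION & SPEC =====
def Spec_find_quote_ranges_with_ids_py (text : String) (quotes_with_ids : List (String × Int)) (out : List (Int × Int × Int)) : Prop := out = find_quote_ranges_with_ids_py_alt text quotes_with_ids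
instance (text : String) (quotes_with_ids : List (String × Int)) (out : List (Int × Int × Int)) : Decidable (Spec_find_quote_ranges_with_ids_py text quotes_with_ids out) := by unfold Spec_find_quote_ranges_with_ids_py; infer_instance

-- ===== CLAIM (what is proved, stated in full; the proofs are below) =====
def Claim_equal_find_quote_ranges_with_ids_py : Prop := ∀ (text : String) (quotes_with_ids : List (String × Int)), Dom_find_quote_ranges_with_ids_py text quotes_with_ids → Spec_find_quote_ranges_with_ids_py text quotes_with_ids (find_quote_ranges_with_ids_py text quotes_with_ids)

-- ===== LEMMAS AND PROOFS =====

-- A's tuple-building loop is B's position loop mapped through the tuple maker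
theorem pvALoop_eq_map (text q : String) (qid : Int) (hL : 1 ≤ PySem.Str.len q) :
    ∀ (fuel : Nat) (s : Int),
      pvALoop text q qid fuel s
        = (pvBLoop text q fuel (PySem.Str.findFrom text q s)).map
            (fun i => (i, i + PySem.Str.len q, qid)) := by
  intro fuel
  induction fuel with
  | zero => intro s; rfl
  | succ fuel ih =>
    intro s
    show (if PySem.Str.findFrom text q s = -1 then ([] : List (Int × Int × Int))
      else (PySem.Str.findFrom text q s, PySem.Str.findFrom text q s + PySem.Str.len q, qid) ::
        pvALoop text q qid fuel (PySem.Str.findFrom text q s + max 1 (PySem.Str.len q)))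
      = ((if PySem.Str.findFrom text q s = -1 then ([] : List Int)
          else PySem.Str.findFrom text q s ::
            pvBLoop text q fuel (PySem.Str.findFrom text q
              (PySem.Str.findFrom text q s + PySem.Str.len q))).map
          (fun i => (i, i + PySem.Str.len q, qid)))
    by_cases h : PySem.Str.findFrom text q s = -1
    · rw [if_pos h, if_pos h]; rfl
    · rw [if_neg h, if_neg h, List.map_cons, max_eq_right hL, ih]

-- B's dict-building step
def pvStepOcc (text : String) (d : PySem.Dict String (List Int)) (p : String × Int) :
    PySem.Dict String (List Int) :=
  if p.1 = "" then d
  else if d.contains p.1 then d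
  else d.insert p.1 (pvOccOf text p.1)

theorem pvOcc_get (text : String) (l : List (String × Int)) :
    ∀ (d : PySem.Dict String (List Int)),
      (∀ q v, d.get? q = some v → v = pvOccOf text q) →
      ∀ q v, (l.foldl (pvStepOcc text) d).get? q = some v → v = pvOccOf text q := by
  induction l with
  | nil => intro d hd q v h; exact hd q v h
  | cons p ps ih =>
    intro d hd q v h
    rw [List.foldl_cons] at h
    refine ih (pvStepOcc text d p) ?_ q v h
    intro q' v' h'
    unfold pvStepOcc at h'
    split_ifs at h' with h1 h2
    · exact hd q' v' h'
    · exact hd q' v' h'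
    · by_cases he : q' = p.1
      · subst he
        rw [PySem.Dict.get?_insert_self] at h'
        exact (Option.some.inj h').symm
      · rw [PySem.Dict.get?_insert_of_ne _ _ he] at h'
        exact hd q' v' h' 

theorem pvOcc_contains_mono (text : String) (l : List (String × Int)) :
    ∀ (d : PySem.Dict String (List Int)) (k : String), d.contains k = true →
      (l.foldl (pvStepOcc text) d).contains k = true := by
  induction l with
  | nil => intro d k h; exact h
  | cons p ps ih =>
    intro d k h
    rw [List.foldl_cons]
    refine ih _ k ?_
    unfold pvStepOcc
    split_ifs with h1 h2
    · exact h
    · exact h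
    · rw [PySem.Dict.contains_insert]
      simp [h]

theorem pvOcc_contains (text : String) (l : List (String × Int)) :
    ∀ (d : PySem.Dict String (List Int)) (p : String × Int), p ∈ l → p.1 ≠ "" →
      (l.foldl (pvStepOcc text) d).contains p.1 = true := by
  induction l with
  | nil => intro d p h; exact absurd h (List.not_mem_nil)
  | cons x xs ih =>
    intro d p hmem hne
    rcases List.mem_cons.mp hmem with rfl | h
    · rw [List.foldl_cons]
      refine pvOcc_contains_mono text xs _ p.1 ?_
      unfold pvStepOcc
      split_ifs with h1 h2
      · exact absurd h1 hne
      · exact h2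
      · exact PySem.Dict.contains_insert_self _ _ _
    · exact ih _ p h hne

theorem pvFoldA_eq (text : String) (occ : PySem.Dict String (List Int))
    (qs : List (String × Int))
    (h : ∀ p ∈ qs, PySem.Str.strip p.1 ≠ "" →
        occ.getD (PySem.Str.strip p.1) [] = pvOccOf text (PySem.Str.strip p.1)) :
    ∀ acc,
      qs.foldl (fun ranges p =>
        let q := PySem.Str.strip p.1
        if q = "" then ranges
        else ranges ++ pvALoop text q p.2 (text.toList.length + 2) 0) acc
      = acc ++ qs.flatMap (fun p =>
          if PySem.Str.strip p.1 = "" then []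
          else (occ.getD (PySem.Str.strip p.1) []).map
            (fun i => (i, i + PySem.Str.len (PySem.Str.strip p.1), p.2))) := by
  induction qs with
  | nil => intro acc; simp
  | cons p ps ih =>
    intro acc
    rw [List.foldl_cons, List.flatMap_cons]
    by_cases hq : PySem.Str.strip p.1 = ""
    · simp only [hq, reduceIte, List.nil_append]
      exact ih (fun r hr => h r (List.mem_cons_of_mem _ hr)) acc
    · have hL : 1 ≤ PySem.Str.len (PySem.Str.strip p.1) := by
        rw [PySem.Str.len_eq]
        have : (PySem.Str.strip p.1).toList ≠ [] := by
          intro hn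
          exact hq (by rw [← String.toList_inj] at *; simpa using hn)
        have := List.length_pos_of_ne_nil this
        omega
      simp only [if_neg hq]
      rw [ih (fun r hr => h r (List.mem_cons_of_mem _ hr))]
      rw [h p (List.mem_cons_self) hq]
      rw [pvALoop_eq_map text _ p.2 hL]
      simp [pvOccOf, List.append_assoc]

-- ===== VERDICT =====
theorem find_quote_ranges_with_ids_py_spec : Claim_equal_find_quote_ranges_with_ids_py := by
  intro text qs _
  unfold Spec_find_quote_ranges_with_ids_py find_quote_ranges_with_ids_py find_quote_ranges_with_ids_py_alt
  set items := qs.map (fun p => (PySem.Str.strip p.1, p.2)) with hitems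
  set occ := items.foldl (fun (d : PySem.Dict String (List Int)) p =>
      if p.1 = "" then d
      else if d.contains p.1 then d
      else d.insert p.1 (pvOccOf text p.1)) PySem.Dict.empty with hocc
  have hoccStep : occ = items.foldl (pvStepOcc text) PySem.Dict.empty := by
    rw [hocc]; rfl
  have hget : ∀ p ∈ qs, PySem.Str.strip p.1 ≠ "" →
      occ.getD (PySem.Str.strip p.1) [] = pvOccOf text (PySem.Str.strip p.1) := by
    intro p hp hne
    have hmem : (PySem.Str.strip p.1, p.2) ∈ items := by
      rw [hitems]; exact List.mem_map_of_mem hp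
    have hcont : occ.contains (PySem.Str.strip p.1) = true := by
      rw [hoccStep]
      exact pvOcc_contains text items PySem.Dict.empty _ hmem hne
    have hsome : (occ.get? (PySem.Str.strip p.1)).isSome := by
      rw [← PySem.Dict.contains_eq_isSome_get?]; exact hcont
    obtain ⟨v, hv⟩ := Option.isSome_iff_exists.mp hsome
    have hval : v = pvOccOf text (PySem.Str.strip p.1) := by
      rw [hoccStep] at hv
      exact pvOcc_get text items PySem.Dict.empty
        (by intro q l hl; simp [PySem.Dict.get?_empty] at hl) _ v hv
    rw [PySem.Dict.getD_eq_get?_getD, hv, hval]; rfl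
  rw [pvFoldA_eq text occ qs hget []]
  rw [hitems, List.flatMap_map]
  rfl
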